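-- pv_equiv track=rewrite | github.com/HumblePiCCI/Assessor | marking_framework/scripts/assessor_context.py | normalize_genre
-- ===== SOURCE A (Python) =====
-- GENRE_ALIASES = {
--     "literary_analysis": {"literary_analysis", "literary analysis", "theme analysis"},
--     "argumentative": {"argumentative", "argument", "argumentative essay"},
--     "informational_report": {"informational_report", "informational report", "report", "expository"},
--     "news_report": {"news_report", "news report", "osstl", "osslt"},
--     "narrative": {"narrative", "personal narrative", "story"},
--     "descriptive": {"descriptive", "description", "sensory"},
--     "summary_report": {"summary_report", "summary report", "summary"},
--     "instructions": {"instructions", "instruction", "procedural writing", "procedure", "how to", "how-to", "lab procedure"},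
--     "book_review": {"book_review", "book review", "reader response", "response to literature"},
--     "informative_letter": {"informative_letter", "informative letter", "expository letter"},
--     "speech": {"speech", "persuasive speech", "oral argument", "address"},
--     "portfolio": {"portfolio", "writing portfolio", "mixed forms", "mixed form"},
--     "research_report": {"research_report", "research report", "research project"},
--     "opinion_letter": {"opinion_letter", "opinion letter", "letter to the editor"},
--     "advertisement": {"advertisement", "ad", "persuasive ad"},
--     "letter": {"letter", "reader response", "response letter"},
-- }
--
-- CANONICAL_GENRE_MAP = {
--     "opinion_letter": "argumentative",
--     "advertisement": "argumentative",
--     "letter": "argumentative",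
--     "descriptive": "narrative",
--     "research_report": "informational_report",
-- }
--
-- def normalize_genre(value: str | None) -> str | None:
--     if not value:
--         return None
--     lowered = value.strip().lower()
--     for key, aliases in GENRE_ALIASES.items():
--         if lowered == key or lowered in aliases:
--             return CANONICAL_GENRE_MAP.get(key, key)
--     normalized = lowered.replace(" ", "_")
--     return CANONICAL_GENRE_MAP.get(normalized, normalized)
-- ===== SOURCE B (Python) =====
-- CANONICAL_GENRE_MAP = {
--     "opinion_letter": "argumentative",
--     "advertisement": "argumentative",
--     "letter": "argumentative",
--     "descriptive": "narrative",
--     "research_report": "informational_report",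
-- }
--
-- # Precomputed flat lookup table: every alias (keys included) mapped directly to its
-- # resolved canonical genre, with first-match-wins already applied (the duplicate
-- # alias "reader response" resolves to book_review, its first group).
-- _ALIAS_TO_GENRE = {
--     "literary_analysis": "literary_analysis",
--     "literary analysis": "literary_analysis",
--     "theme analysis": "literary_analysis",
--     "argumentative": "argumentative",
--     "argument": "argumentative",
--     "argumentative essay": "argumentative",
--     "informational_report": "informational_report",
--     "informational report": "informational_report",
--     "report": "informational_report",
--     "expository": "informational_report",
--     "news_report": "news_report",
--     "news report": "news_report",
--     "osstl": "news_report",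
--     "osslt": "news_report",
--     "narrative": "narrative",
--     "personal narrative": "narrative",
--     "story": "narrative",
--     "descriptive": "narrative",
--     "description": "narrative",
--     "sensory": "narrative",
--     "summary_report": "summary_report",
--     "summary report": "summary_report",
--     "summary": "summary_report",
--     "instructions": "instructions",
--     "instruction": "instructions",
--     "procedural writing": "instructions",
--     "procedure": "instructions",
--     "how to": "instructions",
--     "how-to": "instructions",
--     "lab procedure": "instructions",
--     "book_review": "book_review",
--     "book review": "book_review",
--     "reader response": "book_review",
--     "response to literature": "book_review",
--     "informative_letter": "informative_letter",
--     "informative letter": "informative_letter",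
--     "expository letter": "informative_letter",
--     "speech": "speech",
--     "persuasive speech": "speech",
--     "oral argument": "speech",
--     "address": "speech",
--     "portfolio": "portfolio",
--     "writing portfolio": "portfolio",
--     "mixed forms": "portfolio",
--     "mixed form": "portfolio",
--     "research_report": "informational_report",
--     "research report": "informational_report",
--     "research project": "informational_report",
--     "opinion_letter": "argumentative",
--     "opinion letter": "argumentative",
--     "letter to the editor": "argumentative",
--     "advertisement": "argumentative",
--     "ad": "argumentative",
--     "persuasive ad": "argumentative",
--     "letter": "argumentative",
--     "response letter": "argumentative",
-- }
--
--
-- def normalize_genre(value):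
--     if not value:
--         return None
--     lowered = value.strip().lower()
--     if lowered in _ALIAS_TO_GENRE:
--         return _ALIAS_TO_GENRE[lowered]
--     normalized = lowered.replace(" ", "_")
--     return CANONICAL_GENRE_MAP.get(normalized, normalized)
-- ===== Notes on version B (the rewrite author's own statement) =====
-- stated objective: idiomatic
-- what changed: Replaces the per-call scan over GENRE_ALIASES groups (string compare plus set membership per group) with a single precomputed flat dict mapping every alias directly to its resolved canonical genre, queried with one lookup per call.
import Mathlib
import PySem

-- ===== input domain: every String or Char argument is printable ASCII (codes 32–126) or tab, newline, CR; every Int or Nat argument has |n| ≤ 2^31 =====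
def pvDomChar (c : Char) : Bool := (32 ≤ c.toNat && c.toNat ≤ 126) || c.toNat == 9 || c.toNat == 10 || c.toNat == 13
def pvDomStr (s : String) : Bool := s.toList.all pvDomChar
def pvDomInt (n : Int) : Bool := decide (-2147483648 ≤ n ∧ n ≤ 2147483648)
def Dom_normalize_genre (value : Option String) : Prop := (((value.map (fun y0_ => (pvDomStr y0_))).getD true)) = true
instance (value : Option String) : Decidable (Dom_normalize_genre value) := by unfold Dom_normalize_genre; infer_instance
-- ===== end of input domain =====

-- B replaces A's per-call scan over the alias groups by one lookup in a precomputed flat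
-- alias → canonical-genre table (idiomatic; first-match-wins already applied in the table).

-- ===== PORT A =====
-- GENRE_ALIASES: association list of (key, alias set); A only tests membership, so
-- Python-set iteration order is irrelevant; written in source order.
def pvGenreAliases : List (String × PySem.Set String) :=
  [ ("literary_analysis", PySem.Set.ofList ["literary_analysis", "literary analysis", "theme analysis"]),
    ("argumentative", PySem.Set.ofList ["argumentative", "argument", "argumentative essay"]),
    ("informational_report", PySem.Set.ofList ["informational_report", "informational report", "report", "expository"]),
    ("news_report", PySem.Set.ofList ["news_report", "news report", "osstl", "osslt"]),
    ("narrative", PySem.Set.ofList ["narrative", "personal narrative", "story"]),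
    ("descriptive", PySem.Set.ofList ["descriptive", "description", "sensory"]),
    ("summary_report", PySem.Set.ofList ["summary_report", "summary report", "summary"]),
    ("instructions", PySem.Set.ofList ["instructions", "instruction", "procedural writing", "procedure", "how to", "how-to", "lab procedure"]),
    ("book_review", PySem.Set.ofList ["book_review", "book review", "reader response", "response to literature"]),
    ("informative_letter", PySem.Set.ofList ["informative_letter", "informative letter", "expository letter"]),
    ("speech", PySem.Set.ofList ["speech", "persuasive speech", "oral argument", "address"]),
    ("portfolio", PySem.Set.ofList ["portfolio", "writing portfolio", "mixed forms", "mixed form"]),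
    ("research_report", PySem.Set.ofList ["research_report", "research report", "research project"]),
    ("opinion_letter", PySem.Set.ofList ["opinion_letter", "opinion letter", "letter to the editor"]),
    ("advertisement", PySem.Set.ofList ["advertisement", "ad", "persuasive ad"]),
    ("letter", PySem.Set.ofList ["letter", "reader response", "response letter"]) ]

def pvCanonicalGenreMap : PySem.Dict String String :=
  PySem.Dict.ofList
    [ ("opinion_letter", "argumentative"),
      ("advertisement", "argumentative"),
      ("letter", "argumentative"),
      ("descriptive", "narrative"),
      ("research_report", "informational_report") ]

-- 'for key, aliases in GENRE_ALIASES.items(): if … return …' with early return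
def pvLoopA (lowered : String) : List (String × PySem.Set String) → Option String
  | [] => none
  | (key, aliases) :: rest =>
      if lowered == key || aliases.contains lowered then
        some (PySem.Dict.getD pvCanonicalGenreMap key key)
      else pvLoopA lowered rest

def normalize_genre (value : Option String) : Option String :=
  match value with
  | none => none
  | some v =>
      if v == "" then none
      else
        let lowered := PySem.Str.lower (PySem.Str.strip v)
        match pvLoopA lowered pvGenreAliases with
        | some r => some r
        | none =>
            let normalized := PySem.Str.replace lowered " " "_"
            some (PySem.Dict.getD pvCanonicalGenreMap normalized normalized)

-- ===== PORT B =====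
-- Source B's module constants: CANONICAL_GENRE_MAP and the precomputed flat literal dict
-- _ALIAS_TO_GENRE (pairs listed as written in Source B).
def pvCanonB : PySem.Dict String String :=
  PySem.Dict.ofList
    [ ("opinion_letter", "argumentative"),
      ("advertisement", "argumentative"),
      ("letter", "argumentative"),
      ("descriptive", "narrative"),
      ("research_report", "informational_report") ]

def pvFlatPairs : List (String × String) :=
  [
    ("literary_analysis", "literary_analysis"),
    ("literary analysis", "literary_analysis"),
    ("theme analysis", "literary_analysis"),
    ("argumentative", "argumentative"),
    ("argument", "argumentative"),
    ("argumentative essay", "argumentative"),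
    ("informational_report", "informational_report"),
    ("informational report", "informational_report"),
    ("report", "informational_report"),
    ("expository", "informational_report"),
    ("news_report", "news_report"),
    ("news report", "news_report"),
    ("osstl", "news_report"),
    ("osslt", "news_report"),
    ("narrative", "narrative"),
    ("personal narrative", "narrative"),
    ("story", "narrative"),
    ("descriptive", "narrative"),
    ("description", "narrative"),
    ("sensory", "narrative"),
    ("summary_report", "summary_report"),
    ("summary report", "summary_report"),
    ("summary", "summary_report"),
    ("instructions", "instructions"),
    ("instruction", "instructions"),
    ("procedural writing", "instructions"),
    ("procedure", "instructions"),
    ("how to", "instructions"),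
    ("how-to", "instructions"),
    ("lab procedure", "instructions"),
    ("book_review", "book_review"),
    ("book review", "book_review"),
    ("reader response", "book_review"),
    ("response to literature", "book_review"),
    ("informative_letter", "informative_letter"),
    ("informative letter", "informative_letter"),
    ("expository letter", "informative_letter"),
    ("speech", "speech"),
    ("persuasive speech", "speech"),
    ("oral argument", "speech"),
    ("address", "speech"),
    ("portfolio", "portfolio"),
    ("writing portfolio", "portfolio"),
    ("mixed forms", "portfolio"),
    ("mixed form", "portfolio"),
    ("research_report", "informational_report"),
    ("research report", "informational_report"),
    ("research project", "informational_report"),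
    ("opinion_letter", "argumentative"),
    ("opinion letter", "argumentative"),
    ("letter to the editor", "argumentative"),
    ("advertisement", "argumentative"),
    ("ad", "argumentative"),
    ("persuasive ad", "argumentative"),
    ("letter", "argumentative"),
    ("response letter", "argumentative")
  ]

def pvAliasToGenre : PySem.Dict String String := PySem.Dict.ofList pvFlatPairs

def normalize_genre_alt (value : Option String) : Option String :=
  match value with
  | none => none
  | some v =>
      if v == "" then none
      else
        let lowered := PySem.Str.lower (PySem.Str.strip v)
        if PySem.Dict.contains pvAliasToGenre lowered then
          PySem.Dict.get? pvAliasToGenre lowered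
        else
          let normalized := PySem.Str.replace lowered " " "_"
          some (PySem.Dict.getD pvCanonB normalized normalized)

-- ===== PRECONDITION & SPEC =====
def Spec_normalize_genre (value : Option String) (out : Option String) : Prop := out = normalize_genre_alt value
instance (value : Option String) (out : Option String) : Decidable (Spec_normalize_genre value out) := by unfold Spec_normalize_genre; infer_instance

-- ===== CLAIM (what is proved, stated in full; the proofs are below) =====
def Claim_equal_normalize_genre : Prop := ∀ (value : Option String), Dom_normalize_genre value → Spec_normalize_genre value (normalize_genre value)

-- ===== LEMMAS AND PROOFS =====

-- the 56 distinct alias strings (the keys of B's flat table)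
def pvAllAliases : List String := ["literary_analysis", "literary analysis", "theme analysis", "argumentative", "argument", "argumentative essay", "informational_report", "informational report", "report", "expository", "news_report", "news report", "osstl", "osslt", "narrative", "personal narrative", "story", "descriptive", "description", "sensory", "summary_report", "summary report", "summary", "instructions", "instruction", "procedural writing", "procedure", "how to", "how-to", "lab procedure", "book_review", "book review", "reader response", "response to literature", "informative_letter", "informative letter", "expository letter", "speech", "persuasive speech", "oral argument", "address", "portfolio", "writing portfolio", "mixed forms", "mixed form", "research_report", "research report", "research project", "opinion_letter", "opinion letter", "letter to the editor", "advertisement", "ad", "persuasive ad", "letter", "response letter"]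

set_option maxRecDepth 20000 in
theorem pv_canon_eq : pvCanonicalGenreMap = pvCanonB := by decide

set_option maxRecDepth 20000 in
theorem pv_mk : pvAliasToGenre = PySem.Dict.mk pvFlatPairs := by decide

-- the whole post-guard body: A's loop-with-fallback equals B's lookup-with-fallback
set_option maxRecDepth 20000 in
theorem pv_body (s : String) :
    (match pvLoopA s pvGenreAliases with
     | some r => some r
     | none =>
         some (PySem.Dict.getD pvCanonicalGenreMap
                (PySem.Str.replace s " " "_") (PySem.Str.replace s " " "_"))) =
    (if PySem.Dict.contains pvAliasToGenre s then PySem.Dict.get? pvAliasToGenre s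
     else
       some (PySem.Dict.getD pvCanonB
              (PySem.Str.replace s " " "_") (PySem.Str.replace s " " "_"))) := by
  by_cases hs : s ∈ pvAllAliases
  · fin_cases hs <;> decide
  · simp only [pvAllAliases, List.mem_cons, List.not_mem_nil, or_false, not_or] at hs
    have hg : PySem.Dict.get? pvAliasToGenre s = none := by
      rw [pv_mk]
      simp [PySem.Dict.get?, pvFlatPairs, hs, Ne.symm]
    have hc : PySem.Dict.contains pvAliasToGenre s = false := by
      rw [PySem.Dict.contains_eq_isSome_get?, hg]
      rfl
    have hl : pvLoopA s pvGenreAliases = none := by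
      simp [pvLoopA, pvGenreAliases, hs, Ne.symm,
            PySem.Set.ofList, PySem.Set.add, PySem.Set.contains]
    rw [hl, hc, pv_canon_eq]
    simp

-- ===== VERDICT (by name: the statement is the Claim_ definition above) =====
theorem normalize_genre_spec : Claim_equal_normalize_genre := by
  intro value _
  unfold Spec_normalize_genre normalize_genre normalize_genre_alt
  cases value with
  | none => rfl
  | some v =>
      dsimp only
      by_cases hv : (v == "") = true
      · rw [if_pos hv, if_pos hv]
      · rw [if_neg hv, if_neg hv]
        exact pv_body (PySem.Str.lower (PySem.Str.strip v))
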